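-- pv_equiv track=rewrite | github.com/danialutegenov/pobot-ai | app/retrieval.py | select_diverse_hits
-- ===== SOURCE A (Python) =====
-- from collections import defaultdict
-- from typing import Any
--
-- def select_diverse_hits(
--     hits: list[dict[str, Any]],
--     top_k: int,
--     per_source_cap: int = 2,
--     source_key: str = "source_url",
-- ) -> list[dict[str, Any]]:
--     if top_k <= 0:
--         return []
--     if per_source_cap <= 0:
--         return hits[:top_k]
--
--     selected: list[dict[str, Any]] = []
--     deferred: list[dict[str, Any]] = []
--     source_counts: dict[str, int] = defaultdict(int)
--
--     # Pass 1: keep ranking order but cap repeated chunks from the same source.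
--     for hit in hits:
--         source = str(hit.get(source_key, ""))
--         if source_counts[source] < per_source_cap and len(selected) < top_k:
--             selected.append(hit)
--             source_counts[source] += 1
--         else:
--             deferred.append(hit)
--         if len(selected) >= top_k:
--             break
--
--     # Pass 2: if there are not enough diverse hits, backfill by best remaining.
--     if len(selected) < top_k:
--         for hit in deferred:
--             selected.append(hit)
--             if len(selected) >= top_k:
--                 break
--     return selected
-- ===== SOURCE B (Python) =====
-- def select_diverse_hits(
--     hits,
--     top_k,
--     per_source_cap=2,
--     source_key="source_url",
-- ):
--     # Annotate each hit with an overflow flag (its occurrence rank within its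
--     # source reached the cap), stable-sort by that flag so overflow hits sink
--     # to the back, then take the first top_k.
--     if top_k <= 0:
--         return []
--     if per_source_cap <= 0:
--         return hits[:top_k]
--
--     counts = {}
--     keyed = []
--     for hit in hits:
--         s = str(hit.get(source_key, ""))
--         r = counts.get(s, 0)
--         counts[s] = r + 1
--         keyed.append((1 if r >= per_source_cap else 0, hit))
--     ordered = sorted(keyed, key=lambda p: p[0])
--     return [h for _, h in ordered][:top_k]
-- ===== Notes on version B (the rewrite author's own statement) =====
-- stated objective: alternative
-- what changed: Replaced A's capped selection pass with early break plus a conditional backfill loop by a flag-then-stable-sort scheme: one pass annotates each hit with an overflow flag (occurrence rank within its source reached the cap), a stable sort by that flag sinks overflow hits to the back, and the first top_k of the sorted list are returned.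
import Mathlib
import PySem

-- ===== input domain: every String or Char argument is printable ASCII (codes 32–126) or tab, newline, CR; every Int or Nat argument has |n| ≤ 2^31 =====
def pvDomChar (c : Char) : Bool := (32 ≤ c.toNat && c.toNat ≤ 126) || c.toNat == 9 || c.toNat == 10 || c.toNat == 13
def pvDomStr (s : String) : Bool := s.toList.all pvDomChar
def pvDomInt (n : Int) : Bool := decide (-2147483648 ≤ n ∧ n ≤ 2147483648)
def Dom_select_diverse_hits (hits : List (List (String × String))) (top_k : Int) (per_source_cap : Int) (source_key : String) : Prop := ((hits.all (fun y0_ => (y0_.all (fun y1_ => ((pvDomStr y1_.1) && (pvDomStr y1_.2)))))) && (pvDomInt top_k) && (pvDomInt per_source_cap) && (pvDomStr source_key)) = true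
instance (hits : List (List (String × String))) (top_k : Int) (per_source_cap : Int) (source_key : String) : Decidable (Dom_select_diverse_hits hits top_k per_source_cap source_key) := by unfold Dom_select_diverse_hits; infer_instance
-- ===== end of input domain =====

-- B replaces A's early-break capped pass + conditional backfill loop by a
-- flag-then-stable-sort scheme: annotate each hit with an overflow flag,
-- stable-sort by the flag, take the first top_k (objective: alternative).

-- shared helper: str(hit.get(source_key, "")) — str is the identity on str values
def pvSrc (source_key : String) (hit : List (String × String)) : String :=
  (PySem.Dict.mk hit).getD source_key ""

-- ===== PORT A =====
-- Pass 1 of A: capped selection with early break ('break' = returning the pair).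
def pvLoopA (source_key : String) (top_k per_source_cap : Int) :
    List (List (String × String)) → List (List (String × String)) →
    List (List (String × String)) → PySem.Dict String Int →
    (List (List (String × String)) × List (List (String × String)))
  | [], sel, defr, _ => (sel, defr)
  | h :: t, sel, defr, cnt =>
    let s := pvSrc source_key h
    if cnt.getD s 0 < per_source_cap ∧ (sel.length : Int) < top_k then
      let sel' := sel ++ [h]
      let cnt' := cnt.modify s 0 (· + 1)   -- defaultdict(int): source_counts[s] += 1
      if top_k ≤ (sel'.length : Int) then (sel', defr)
      else pvLoopA source_key top_k per_source_cap t sel' defr cnt'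
    else
      let defr' := defr ++ [h]
      if top_k ≤ (sel.length : Int) then (sel, defr')
      else pvLoopA source_key top_k per_source_cap t sel defr' cnt

-- Pass 2 of A: backfill from deferred, breaking at top_k.
def pvBackfill (top_k : Int) :
    List (List (String × String)) → List (List (String × String)) →
    List (List (String × String))
  | [], sel => sel
  | h :: t, sel =>
    let sel' := sel ++ [h]
    if top_k ≤ (sel'.length : Int) then sel' else pvBackfill top_k t sel'

def select_diverse_hits (hits : List (List (String × String))) (top_k : Int) (per_source_cap : Int) (source_key : String) : List (List (String × String)) :=
  if top_k ≤ 0 then []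
  else if per_source_cap ≤ 0 then PySem.List.slice hits none (some top_k)
  else
    let p := pvLoopA source_key top_k per_source_cap hits [] [] PySem.Dict.empty
    if (p.1.length : Int) < top_k then pvBackfill top_k p.2 p.1 else p.1

-- ===== PORT B =====
-- B's annotation pass: pair each hit with an overflow flag (1 iff its
-- occurrence rank within its source already reached the cap).
def pvAnnotate (source_key : String) (cap : Int) :
    List (List (String × String)) → PySem.Dict String Int →
    List (Int × List (String × String))
  | [], _ => []
  | h :: t, cnt =>
    let s := pvSrc source_key h
    let r := cnt.getD s 0
    (if cap ≤ r then (1 : Int) else 0, h) :: pvAnnotate source_key cap t (cnt.insert s (r + 1))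

def select_diverse_hits_alt (hits : List (List (String × String))) (top_k : Int) (per_source_cap : Int) (source_key : String) : List (List (String × String)) :=
  if top_k ≤ 0 then []
  else if per_source_cap ≤ 0 then PySem.List.slice hits none (some top_k)
  else
    let keyed := pvAnnotate source_key per_source_cap hits PySem.Dict.empty
    let ordered := PySem.List.sorted keyed (fun p => p.1)
    PySem.List.slice (ordered.map (fun p => p.2)) none (some top_k)

-- ===== PRECONDITION & SPEC =====
def Spec_select_diverse_hits (hits : List (List (String × String))) (top_k : Int) (per_source_cap : Int) (source_key : String) (out : List (List (String × String))) : Prop := out = select_diverse_hits_alt hits top_k per_source_cap source_key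
instance (hits : List (List (String × String))) (top_k : Int) (per_source_cap : Int) (source_key : String) (out : List (List (String × String))) : Decidable (Spec_select_diverse_hits hits top_k per_source_cap source_key out) := by unfold Spec_select_diverse_hits; infer_instance

-- ===== CLAIM =====
def Claim_equal_select_diverse_hits : Prop := ∀ (hits : List (List (String × String))) (top_k : Int) (per_source_cap : Int) (source_key : String), Dom_select_diverse_hits hits top_k per_source_cap source_key → Spec_select_diverse_hits hits top_k per_source_cap source_key (select_diverse_hits hits top_k per_source_cap source_key)

-- ===== LEMMAS AND PROOFS =====

-- Proof-side intermediate: a break-free partition of the hits by the cap.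
def pvPart (source_key : String) (per_source_cap : Int) :
    List (List (String × String)) → List (List (String × String)) →
    List (List (String × String)) → PySem.Dict String Int →
    (List (List (String × String)) × List (List (String × String)))
  | [], sel, defr, _ => (sel, defr)
  | h :: t, sel, defr, cnt =>
    let s := pvSrc source_key h
    if cnt.getD s 0 < per_source_cap then
      pvPart source_key per_source_cap t (sel ++ [h]) defr (cnt.insert s (cnt.getD s 0 + 1))
    else
      pvPart source_key per_source_cap t sel (defr ++ [h]) cnt

-- pvPart only appends to its selected accumulator.
lemma pvPart_prefix (key : String) (cap : Int) (rest : List (List (String × String)))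
    (sel defr : List (List (String × String))) (cnt : PySem.Dict String Int) :
    sel <+: (pvPart key cap rest sel defr cnt).1 := by
  induction rest generalizing sel defr cnt with
  | nil => simp [pvPart]
  | cons h t ih =>
    simp only [pvPart]
    split
    · exact List.IsPrefix.trans ⟨[h], rfl⟩ (ih _ _ _)
    · exact ih _ _ _

-- A's backfill is append-then-truncate.
lemma pvBackfill_eq (top_k : Int) (d sel : List (List (String × String)))
    (h : (sel.length : Int) < top_k) :
    pvBackfill top_k d sel = (sel ++ d).take top_k.toNat := by
  induction d generalizing sel with
  | nil =>
    have hle : sel.length ≤ top_k.toNat := by omega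
    simp [pvBackfill, List.take_of_length_le hle]
  | cons x t ih =>
    simp only [pvBackfill]
    split
    · rename_i hle
      have hlen : (sel ++ [x]).length = top_k.toNat := by simp at hle ⊢; omega
      have hsplit : sel ++ x :: t = (sel ++ [x]) ++ t := by simp
      have h1 : top_k.toNat ≤ (sel ++ [x]).length := by omega
      have h2 : (sel ++ [x]).length ≤ top_k.toNat := by omega
      rw [hsplit, List.take_append_of_le_length h1, List.take_of_length_le h2]
    · rename_i hlt
      have hsplit : sel ++ x :: t = (sel ++ [x]) ++ t := by simp
      rw [hsplit, ih (sel ++ [x]) (by simp at hlt ⊢; omega)]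

-- Core A-side: A's loop+backfill equals the break-free partition followed by
-- truncation, for count dicts that agree pointwise under getD _ 0.
lemma pvMain (key : String) (cap top_k : Int) (rest : List (List (String × String)))
    (sel defr : List (List (String × String))) (cnt₁ cnt₂ : PySem.Dict String Int)
    (hsel : (sel.length : Int) < top_k)
    (hc : ∀ s, cnt₁.getD s 0 = cnt₂.getD s 0) :
    (if ((pvLoopA key top_k cap rest sel defr cnt₁).1.length : Int) < top_k
     then pvBackfill top_k (pvLoopA key top_k cap rest sel defr cnt₁).2
            (pvLoopA key top_k cap rest sel defr cnt₁).1
     else (pvLoopA key top_k cap rest sel defr cnt₁).1)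
    = ((pvPart key cap rest sel defr cnt₂).1 ++ (pvPart key cap rest sel defr cnt₂).2).take top_k.toNat := by
  induction rest generalizing sel defr cnt₁ cnt₂ with
  | nil =>
    simp only [pvLoopA, pvPart, if_pos hsel]
    exact pvBackfill_eq top_k defr sel hsel
  | cons h t ih =>
    simp only [pvLoopA, pvPart]
    rw [hc (pvSrc key h)]
    by_cases hcap : cnt₂.getD (pvSrc key h) 0 < cap
    · have hcond : cnt₂.getD (pvSrc key h) 0 < cap ∧ (sel.length : Int) < top_k :=
        ⟨hcap, hsel⟩
      rw [if_pos hcond, if_pos hcap]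
      by_cases hbrk : top_k ≤ ((sel ++ [h]).length : Int)
      · rw [if_pos hbrk]
        have hnlt : ¬ (((sel ++ [h]).length : Int) < top_k) := by omega
        rw [if_neg hnlt]
        obtain ⟨r, hr⟩ := pvPart_prefix key cap t (sel ++ [h]) defr
          (cnt₂.insert (pvSrc key h) (cnt₂.getD (pvSrc key h) 0 + 1))
        have h1 : top_k.toNat ≤ (sel ++ [h]).length := by simp at hbrk ⊢; omega
        have h2 : (sel ++ [h]).length ≤ top_k.toNat := by simp at hbrk ⊢; omega
        rw [← hr, List.append_assoc, List.take_append_of_le_length h1,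
          List.take_of_length_le h2]
      · rw [if_neg hbrk]
        exact ih (sel ++ [h]) defr _ _ (by omega)
          (fun s => by
            rw [PySem.Dict.getD_modify, PySem.Dict.getD_insert, hc (pvSrc key h)]
            split
            · rfl
            · exact hc s)
    · have hncond : ¬ (cnt₂.getD (pvSrc key h) 0 < cap ∧ (sel.length : Int) < top_k) :=
        fun hh => hcap hh.1
      have hnbrk : ¬ top_k ≤ (sel.length : Int) := by omega
      rw [if_neg hncond, if_neg hcap, if_neg hnbrk]
      exact ih sel (defr ++ [h]) _ _ hsel hc

-- Inserting a 0-flagged pair into a list of 1-flagged pairs puts it in front.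
lemma pvInsertBy_zero (x : Int × List (String × String)) (hx : x.1 = 0)
    (os : List (Int × List (String × String))) (ho : ∀ p ∈ os, p.1 = 1) :
    PySem.List.insertBy (fun a b => decide (a.1 < b.1)) x os = x :: os := by
  cases os with
  | nil => simp [PySem.List.insertBy]
  | cons o t =>
    have h1 : o.1 = 1 := ho o (by simp)
    simp [PySem.List.insertBy, hx, h1]

-- Inserting into zeros ++ ones: a 0-flag lands between, a 1-flag at the end.
lemma pvInsertBy_split (x : Int × List (String × String))
    (zs os : List (Int × List (String × String)))
    (hx : x.1 = 0 ∨ x.1 = 1)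
    (hz : ∀ p ∈ zs, p.1 = 0) (ho : ∀ p ∈ os, p.1 = 1) :
    PySem.List.insertBy (fun a b => decide (a.1 < b.1)) x (zs ++ os) =
      if x.1 = 0 then zs ++ x :: os else (zs ++ os) ++ [x] := by
  induction zs with
  | nil =>
    rcases hx with hx | hx
    · simp only [hx, List.nil_append]
      exact pvInsertBy_zero x hx os ho
    · rw [if_neg (by omega)]
      refine PySem.List.insertBy_of_forall_not_before _ _ _ (fun y hy => ?_)
      have := ho y (by simpa using hy)
      simp [hx, this]
  | cons z t ih =>
    have hz0 : z.1 = 0 := hz z (by simp)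
    have hlt : ¬ x.1 < z.1 := by rcases hx with hx | hx <;> omega
    have step : PySem.List.insertBy (fun a b => decide (a.1 < b.1)) x ((z :: t) ++ os)
        = z :: PySem.List.insertBy (fun a b => decide (a.1 < b.1)) x (t ++ os) := by
      simp [PySem.List.insertBy, hlt]
    rw [step, ih (fun p hp => hz p (by simp [hp]))]
    split <;> simp

-- Stable sort by a {0,1} flag is the partition: 0-flags (in order) then 1-flags.
lemma pvFoldl_split (l : List (Int × List (String × String)))
    (hl : ∀ p ∈ l, p.1 = 0 ∨ p.1 = 1)
    (zs os : List (Int × List (String × String)))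
    (hz : ∀ p ∈ zs, p.1 = 0) (ho : ∀ p ∈ os, p.1 = 1) :
    l.foldl (fun acc x => PySem.List.insertBy (fun a b => decide (a.1 < b.1)) x acc) (zs ++ os)
      = (zs ++ l.filter (fun p => p.1 == 0)) ++ (os ++ l.filter (fun p => p.1 == 1)) := by
  induction l generalizing zs os with
  | nil => simp
  | cons x t ih =>
    have hx := hl x (by simp)
    have hlt : ∀ p ∈ t, p.1 = 0 ∨ p.1 = 1 := fun p hp => hl p (List.mem_cons_of_mem _ hp)
    simp only [List.foldl_cons]
    rw [pvInsertBy_split x zs os hx hz ho]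
    rcases hx with hx | hx
    · rw [if_pos hx]
      have hz' : ∀ p ∈ zs ++ [x], p.1 = 0 := by
        intro p hp
        rcases List.mem_append.mp hp with hm | hm
        · exact hz p hm
        · simp at hm; subst hm; exact hx
      have hrw : zs ++ x :: os = (zs ++ [x]) ++ os := by simp
      rw [hrw, ih hlt (zs ++ [x]) os hz' ho]
      simp [hx]
    · rw [if_neg (by omega)]
      have ho' : ∀ p ∈ os ++ [x], p.1 = 1 := by
        intro p hp
        rcases List.mem_append.mp hp with hm | hm
        · exact ho p hm
        · simp at hm; subst hm; exact hx
      have hrw : (zs ++ os) ++ [x] = zs ++ (os ++ [x]) := by simp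
      rw [hrw, ih hlt zs (os ++ [x]) hz ho']
      simp [hx]

-- Every flag pvAnnotate produces is 0 or 1.
lemma pvAnnotate_flags (key : String) (cap : Int) (l : List (List (String × String)))
    (cnt : PySem.Dict String Int) :
    ∀ p ∈ pvAnnotate key cap l cnt, p.1 = 0 ∨ p.1 = 1 := by
  induction l generalizing cnt with
  | nil => simp [pvAnnotate]
  | cons h t ih =>
    intro p hp
    simp only [pvAnnotate, List.mem_cons] at hp
    rcases hp with hp | hp
    · subst hp; split <;> simp
    · exact ih _ p hp

-- Bridge: the break-free partition equals the filters of the annotated list,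
-- whenever the partition's count dict is the cap-clamp of the annotation's.
lemma pvPart_eq_filters (key : String) (cap : Int)
    (rest : List (List (String × String)))
    (sel defr : List (List (String × String))) (cnt₁ cnt₂ : PySem.Dict String Int)
    (hinv : ∀ s, cnt₁.getD s 0 = min (cnt₂.getD s 0) cap) :
    pvPart key cap rest sel defr cnt₁ =
      (sel ++ ((pvAnnotate key cap rest cnt₂).filter (fun p => p.1 == 0)).map (·.2),
       defr ++ ((pvAnnotate key cap rest cnt₂).filter (fun p => p.1 == 1)).map (·.2)) := by
  induction rest generalizing sel defr cnt₁ cnt₂ with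
  | nil => simp [pvPart, pvAnnotate]
  | cons h t ih =>
    simp only [pvPart, pvAnnotate]
    have hs := hinv (pvSrc key h)
    by_cases hlt : cnt₂.getD (pvSrc key h) 0 < cap
    · have h1 : cnt₁.getD (pvSrc key h) 0 < cap := by omega
      have heq : cnt₁.getD (pvSrc key h) 0 = cnt₂.getD (pvSrc key h) 0 := by omega
      rw [if_pos h1, if_neg (by omega : ¬ cap ≤ cnt₂.getD (pvSrc key h) 0)]
      have hinv' : ∀ s, (cnt₁.insert (pvSrc key h) (cnt₁.getD (pvSrc key h) 0 + 1)).getD s 0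
          = min ((cnt₂.insert (pvSrc key h) (cnt₂.getD (pvSrc key h) 0 + 1)).getD s 0) cap := by
        intro s
        rw [PySem.Dict.getD_insert, PySem.Dict.getD_insert]
        split
        · omega
        · exact hinv s
      rw [ih (sel ++ [h]) defr (cnt₁.insert (pvSrc key h) (cnt₁.getD (pvSrc key h) 0 + 1))
        (cnt₂.insert (pvSrc key h) (cnt₂.getD (pvSrc key h) 0 + 1)) hinv']
      simp
    · have h1 : ¬ cnt₁.getD (pvSrc key h) 0 < cap := by omega
      rw [if_neg h1, if_pos (by omega : cap ≤ cnt₂.getD (pvSrc key h) 0)]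
      have hinv' : ∀ s, cnt₁.getD s 0
          = min ((cnt₂.insert (pvSrc key h) (cnt₂.getD (pvSrc key h) 0 + 1)).getD s 0) cap := by
        intro s
        rw [PySem.Dict.getD_insert]
        split
        · rename_i hse; rw [hse, hs]; omega
        · exact hinv s
      rw [ih sel (defr ++ [h]) cnt₁
        (cnt₂.insert (pvSrc key h) (cnt₂.getD (pvSrc key h) 0 + 1)) hinv']
      simp

-- ===== VERDICT =====
theorem select_diverse_hits_spec : Claim_equal_select_diverse_hits := by
  intro hits top_k per_source_cap source_key _
  unfold Spec_select_diverse_hits select_diverse_hits select_diverse_hits_alt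
  by_cases h0 : top_k ≤ 0
  · simp [h0]
  · rw [if_neg h0, if_neg h0]
    by_cases hcap : per_source_cap ≤ 0
    · rw [if_pos hcap, if_pos hcap]
    · rw [if_neg hcap, if_neg hcap]
      show (if ((pvLoopA source_key top_k per_source_cap hits [] [] PySem.Dict.empty).1.length : Int) < top_k
            then pvBackfill top_k (pvLoopA source_key top_k per_source_cap hits [] [] PySem.Dict.empty).2
                   (pvLoopA source_key top_k per_source_cap hits [] [] PySem.Dict.empty).1
            else (pvLoopA source_key top_k per_source_cap hits [] [] PySem.Dict.empty).1)
        = PySem.List.slice ((PySem.List.sorted (pvAnnotate source_key per_source_cap hits PySem.Dict.empty) (fun p => p.1)).map (fun p => p.2)) none (some top_k)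
      rw [PySem.List.slice_to _ (by omega)]
      rw [pvMain source_key per_source_cap top_k hits [] [] PySem.Dict.empty
        PySem.Dict.empty (by simp; omega) (fun _ => rfl)]
      have hsorted : PySem.List.sorted (pvAnnotate source_key per_source_cap hits PySem.Dict.empty) (fun p => p.1)
          = (pvAnnotate source_key per_source_cap hits PySem.Dict.empty).filter (fun p => p.1 == 0)
            ++ (pvAnnotate source_key per_source_cap hits PySem.Dict.empty).filter (fun p => p.1 == 1) := by
        rw [PySem.List.sorted_eq_foldl_insertBy]
        have := pvFoldl_split (pvAnnotate source_key per_source_cap hits PySem.Dict.empty)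
          (pvAnnotate_flags source_key per_source_cap hits PySem.Dict.empty)
          [] [] (by simp) (by simp)
        simpa using this
      rw [hsorted,
        pvPart_eq_filters source_key per_source_cap hits [] []
          PySem.Dict.empty PySem.Dict.empty (fun s => by
            simp [PySem.Dict.getD, PySem.Dict.get?, PySem.Dict.empty]
            omega)]
      simp
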